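-- pv_equiv track=rewrite | github.com/syedebtisamali/SEA-LANG | sea.py | uppercase_to_lowercase
-- ===== SOURCE A (Python) =====
-- def uppercase_to_lowercase(code):
--     new_code = []
--     in_string = False
--     quote_type = None
--     escaped = False
--
--     for char in code:
--         # 1. Handle Escape Characters (so \" doesn't end a string)
--         if char == "\\" and in_string and not escaped:
--             escaped = True
--             new_code.append(char)
--             continue
--
--         # 2. Track String State
--         if (char == '"' or char == "'") and not escaped:
--             if not in_string:
--                 in_string = True
--                 quote_type = char
--             elif char == quote_type:
--                 in_string = False
--                 quote_type = None
--
--         # 3. Transform Logic: Lowercase ONLY if not in a string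
--         if not in_string:
--             new_code.append(char.lower())
--         else:
--             new_code.append(char)
--
--         escaped = False # Reset escape flag
--
--     return "".join(new_code)
-- ===== SOURCE B (Python) =====
-- def uppercase_to_lowercase(code):
--     out = []
--     i = 0
--     n = len(code)
--     while i < n:
--         ch = code[i]
--         if ch == '"' or ch == "'":
--             # string literal: scan to the matching unescaped quote, copy verbatim
--             j = i + 1
--             while j < n and code[j] != ch:
--                 j += 2 if code[j] == "\\" else 1
--             j = min(j + 1, n)  # include the closing quote when present
--             out.append(code[i:j])
--             i = j
--         else:
--             out.append(ch.lower())
--             i += 1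
--     return "".join(out)
-- ===== Notes on version B (the rewrite author's own statement) =====
-- stated objective: alternative
-- what changed: Replaced A's per-character state machine (in_string/quote_type/escaped flags carried across every iteration) by a span-based scan: on meeting a quote an inner loop jumps over the whole string literal (skipping backslash-escaped pairs) and copies it verbatim, while characters outside literals are lowercased directly.
import Mathlib
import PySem

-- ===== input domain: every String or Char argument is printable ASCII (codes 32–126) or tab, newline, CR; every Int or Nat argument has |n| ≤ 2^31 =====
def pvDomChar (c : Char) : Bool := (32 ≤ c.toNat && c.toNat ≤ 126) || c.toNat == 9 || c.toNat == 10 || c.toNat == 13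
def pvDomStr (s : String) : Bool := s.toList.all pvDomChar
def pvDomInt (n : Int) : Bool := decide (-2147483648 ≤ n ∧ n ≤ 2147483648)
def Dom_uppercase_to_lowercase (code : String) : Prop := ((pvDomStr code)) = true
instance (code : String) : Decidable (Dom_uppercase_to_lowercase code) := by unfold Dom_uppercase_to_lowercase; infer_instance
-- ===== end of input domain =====

-- B replaces A's per-character in_string/quote_type/escaped state machine by a span scan
-- that copies each string literal verbatim in an inner loop (objective: alternative).


-- ===== PORT A =====
-- state = (new_code, in_string, quote_type, escaped); one fold step per character, as in A
def pvStepA (st : List Char × Bool × Option Char × Bool) (ch : Char) :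
    List Char × Bool × Option Char × Bool :=
  let (acc, in_string, quote_type, escaped) := st
  if ch == '\\' && in_string && !escaped then
    (acc ++ [ch], in_string, quote_type, true)
  else
    let (in_string, quote_type) :=
      if (ch == '"' || ch == '\'') && !escaped then
        if !in_string then (true, some ch)
        else if ch == quote_type.getD ' ' && quote_type.isSome then (false, none)
        else (in_string, quote_type)
      else (in_string, quote_type)
    if !in_string then (acc ++ [PySem.Chars.lowerChar ch], in_string, quote_type, false)
    else (acc ++ [ch], in_string, quote_type, false)

def uppercase_to_lowercase (code : String) : String :=
  String.mk (code.toList.foldl pvStepA ([], false, none, false)).1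

-- ===== PORT B =====
-- inner while loop of Source B: scan for the closing quote q, skipping "\x" pairs;
-- returns (literal body incl. closing quote when present, rest after it)
def pvTakeStr (q : Char) : List Char → List Char × List Char
  | [] => ([], [])
  | c :: cs =>
    if c == q then ([c], cs)
    else if c == '\\' then
      match cs with
      | [] => ([c], [])
      | d :: cs' => let p := pvTakeStr q cs'; (c :: d :: p.1, p.2)
    else let p := pvTakeStr q cs; (c :: p.1, p.2)

theorem pvTakeStr_rest_le (q : Char) : ∀ cs : List Char, (pvTakeStr q cs).2.length ≤ cs.length
  | [] => by simp [pvTakeStr]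
  | c :: cs => by
    unfold pvTakeStr
    split_ifs with h1 h2
    · simp
    · cases cs with
      | nil => simp
      | cons d cs' =>
        simpa using Nat.le_trans (pvTakeStr_rest_le q cs') (by omega)
    · simpa using Nat.le_trans (pvTakeStr_rest_le q cs) (by omega)

-- outer while loop of Source B over the remaining characters
def pvScanB : List Char → List Char
  | [] => []
  | c :: cs =>
    if c == '"' || c == '\'' then
      let p := pvTakeStr c cs
      (c :: p.1) ++ pvScanB p.2
    else
      PySem.Chars.lowerChar c :: pvScanB cs
termination_by cs => cs.length
decreasing_by
  · exact Nat.lt_succ_of_le (pvTakeStr_rest_le c cs)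
  · simp

def uppercase_to_lowercase_alt (code : String) : String :=
  String.mk (pvScanB code.toList)

-- ===== PRECONDITION & SPEC =====
def Spec_uppercase_to_lowercase (code : String) (out : String) : Prop := out = uppercase_to_lowercase_alt code
instance (code : String) (out : String) : Decidable (Spec_uppercase_to_lowercase code out) := by unfold Spec_uppercase_to_lowercase; infer_instance

-- ===== CLAIM (what is proved, stated in full; the proofs are below) =====
def Claim_equal_uppercase_to_lowercase : Prop := ∀ (code : String), Dom_uppercase_to_lowercase code → Spec_uppercase_to_lowercase code (uppercase_to_lowercase code)

-- ===== LEMMAS AND PROOFS =====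

theorem pv_main : ∀ (n : Nat) (cs : List Char), cs.length ≤ n →
    (∀ acc, (cs.foldl pvStepA (acc, false, none, false)).1 = acc ++ pvScanB cs)
    ∧ (∀ acc (q : Char), q = '"' ∨ q = '\'' →
        (cs.foldl pvStepA (acc, true, some q, false)).1
          = acc ++ (pvTakeStr q cs).1 ++ pvScanB (pvTakeStr q cs).2) := by
  intro n
  induction n with
  | zero =>
    intro cs h
    have : cs = [] := List.length_eq_zero_iff.mp (Nat.le_zero.mp h)
    subst this
    constructor
    · intro acc; simp [pvScanB]
    · intro acc q hq; simp [pvTakeStr, pvScanB]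
  | succ n ih =>
    intro cs h
    cases cs with
    | nil =>
      constructor
      · intro acc; simp [pvScanB]
      · intro acc q hq; simp [pvTakeStr, pvScanB]
    | cons c cs =>
      have hlen : cs.length ≤ n := by simpa using h
      constructor
      · intro acc
        by_cases hq : c = '"' ∨ c = '\''
        · have hcq : (c == '"' || c == '\'') = true := by
            rcases hq with h'|h' <;> simp [h']
          have hnb : (c == '\\') = false := by
            rcases hq with h'|h' <;> simp [h']
          rw [List.foldl_cons]
          have hstep : pvStepA (acc, false, none, false) c
              = (acc ++ [c], true, some c, false) := by
            simp [pvStepA, hnb, hcq]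
          rw [hstep, (ih cs hlen).2 (acc ++ [c]) c hq]
          rw [pvScanB]
          simp [hcq]
        · push_neg at hq
          have hcq : (c == '"' || c == '\'') = false := by
            simp [hq.1, hq.2]
          rw [List.foldl_cons]
          have hstep : pvStepA (acc, false, none, false) c
              = (acc ++ [PySem.Chars.lowerChar c], false, none, false) := by
            by_cases hb : c = '\\' <;> simp [pvStepA, hb, hcq]
          rw [hstep, (ih cs hlen).1]
          rw [pvScanB]
          simp [hcq]
      · intro acc q hq
        have hqnb : (q == '\\') = false := by
          rcases hq with h'|h' <;> simp [h']
        by_cases hb : c = '\\'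
        · subst hb
          rw [List.foldl_cons]
          have hstep : pvStepA (acc, true, some q, false) '\\'
              = (acc ++ ['\\'], true, some q, true) := by
            simp [pvStepA]
          rw [hstep]
          cases cs with
          | nil =>
            have hbq : ('\\' == q) = false := by
              rcases hq with h'|h' <;> simp [h']
            simp [pvTakeStr, pvScanB, hbq]
          | cons d cs' =>
            rw [List.foldl_cons]
            have hstep2 : pvStepA (acc ++ ['\\'], true, some q, true) d
                = (acc ++ ['\\', d], true, some q, false) := by
              simp [pvStepA]
            rw [hstep2]
            have hlen' : cs'.length ≤ n := by
              simp at hlen; omega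
            rw [(ih cs' hlen').2 (acc ++ ['\\', d]) q hq]
            have ht : pvTakeStr q ('\\' :: d :: cs')
                = ('\\' :: d :: (pvTakeStr q cs').1, (pvTakeStr q cs').2) := by
              have hbq : ('\\' == q) = false := by
                rcases hq with h'|h' <;> simp [h']
              rw [pvTakeStr.eq_def]
              simp [hbq]
            rw [ht]; simp
        · by_cases hcq : c = q
          · subst hcq
            rw [List.foldl_cons]
            have hstep : pvStepA (acc, true, some c, false) c
                = (acc ++ [PySem.Chars.lowerChar c], false, none, false) := by
              have : (c == '"' || c == '\'') = true := by
                rcases hq with h'|h' <;> simp [h']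
              simp [pvStepA, this, hb]
            rw [hstep, (ih cs hlen).1]
            have ht : pvTakeStr c (c :: cs) = ([c], cs) := by
              rw [pvTakeStr.eq_def]; simp
            have hlc : PySem.Chars.lowerChar c = c := by
              rcases hq with h'|h' <;> subst h' <;> decide
            rw [ht]; simp [hlc]
          · rw [List.foldl_cons]
            have hstep : pvStepA (acc, true, some q, false) c
                = (acc ++ [c], true, some q, false) := by
              by_cases hc2 : c = '"' ∨ c = '\''
              · have : (c == '"' || c == '\'') = true := by
                  rcases hc2 with h'|h' <;> simp [h']
                simp [pvStepA, hb, this, hcq]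
              · push_neg at hc2
                simp [pvStepA, hb, hc2.1, hc2.2]
            rw [hstep, (ih cs hlen).2 (acc ++ [c]) q hq]
            have ht : pvTakeStr q (c :: cs)
                = (c :: (pvTakeStr q cs).1, (pvTakeStr q cs).2) := by
              rw [pvTakeStr.eq_def]
              simp [hcq, hb]
            rw [ht]; simp

-- ===== VERDICT (by name: the statement is the Claim_ definition above) =====
theorem uppercase_to_lowercase_spec : Claim_equal_uppercase_to_lowercase := by
  intro code _
  unfold Spec_uppercase_to_lowercase uppercase_to_lowercase uppercase_to_lowercase_alt
  rw [((pv_main code.toList.length code.toList le_rfl).1 [])]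
  simp
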